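-- pv_equiv track=rewrite | github.com/spollard1810/resumeBackEnd | resume_processor/text_processor.py | _parse_personal_info
-- ===== SOURCE A (Python) =====
-- def _parse_personal_info(section: str) -> dict:
--     """Parse personal information section"""
--     info = {
--         "name": "",
--         "email": "",
--         "phone": "",
--         "location": "",
--         "linkedin": ""
--     }
--
--     lines = section.split('\n')
--     for line in lines:
--         line = line.strip('- *')  # Remove markdown formatting
--         if "Full name:" in line:
--             info["name"] = line.split("Full name:")[1].strip().strip('*')
--         elif "Email:" in line:
--             info["email"] = line.split("Email:")[1].strip().strip('*')
--         elif "Phone number:" in line: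
--             info["phone"] = line.split("Phone number:")[1].strip().strip('*')
--         elif "Location:" in line:
--             info["location"] = line.split("Location:")[1].strip().strip('*')
--         elif "LinkedIn profile:" in line:
--             info["linkedin"] = line.split("LinkedIn profile:")[1].strip().strip('*')
--
--     return info
-- ===== SOURCE B (Python) =====
-- FIELDS = [
--     ("Full name:", "name"),
--     ("Email:", "email"),
--     ("Phone number:", "phone"),
--     ("Location:", "location"),
--     ("LinkedIn profile:", "linkedin"),
-- ]
--
--
-- def _classify(line):
--     """Tag a line with the first field phrase it contains (elif priority), or None."""
--     for phrase, _ in FIELDS: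
--         if phrase in line:
--             return phrase
--     return None
--
--
-- def _parse_personal_info(section: str) -> dict:
--     """Field-major staged parse: strip & classify every line once, then build the
--     result per field from the last line tagged with that field's phrase."""
--     lines = [l.strip('- *') for l in section.split('\n')]
--     tagged = [(_classify(l), l) for l in lines]
--     info = {}
--     for phrase, key in FIELDS:
--         value = ""
--         for tag, line in tagged:
--             if tag == phrase:
--                 value = line.split(phrase)[1].strip().strip('*')
--         info[key] = value
--     return info
-- ===== Notes on version B (the rewrite author's own statement) =====
-- stated objective: alternative
-- what changed: Transposes the traversal: instead of one line-major pass mutating the dict through an if/elif chain, B first strips and classifies every line by its first-contained phrase, then builds the result field-major, scanning the tagged lines per field and keeping the last match.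
import Mathlib
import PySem

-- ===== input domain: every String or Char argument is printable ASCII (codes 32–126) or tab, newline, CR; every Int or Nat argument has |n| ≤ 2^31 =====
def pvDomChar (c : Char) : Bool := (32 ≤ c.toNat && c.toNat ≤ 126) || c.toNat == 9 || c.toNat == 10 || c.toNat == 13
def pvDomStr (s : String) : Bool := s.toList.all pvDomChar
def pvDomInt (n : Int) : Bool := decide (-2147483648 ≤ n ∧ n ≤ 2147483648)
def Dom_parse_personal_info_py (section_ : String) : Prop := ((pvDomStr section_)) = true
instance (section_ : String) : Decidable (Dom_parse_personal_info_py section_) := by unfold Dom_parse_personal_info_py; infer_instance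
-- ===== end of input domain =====

-- B transposes A's traversal: it strips and classifies each line once (first phrase found,
-- the elif priority), then builds the dict field-major from the last line per field.
-- ===== PORT A =====
-- s.split(sep) for a literal non-empty sep: split? is none only for sep = "", so getD [] is exact
def pvSplit (s sep : String) : List String := (PySem.Str.split? s sep).getD []

-- line.split(phrase)[1].strip().strip('*'): the "phrase in line" guard guarantees the
-- split has ≥ 2 pieces, so the [1] access never raises; getD "" is exact under the guard.
def pvExtract (line phrase : String) : String :=
  PySem.Str.stripChars (PySem.Str.strip ((PySem.List.pyGet? (pvSplit line phrase) 1).getD "")) "*"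

-- the body of A's for-loop (if/elif chain)
def pvStepA (info : PySem.Dict String String) (line : String) : PySem.Dict String String :=
  let line := PySem.Str.stripChars line "- *"
  if PySem.Str.isIn "Full name:" line then
    info.insert "name" (pvExtract line "Full name:")
  else if PySem.Str.isIn "Email:" line then
    info.insert "email" (pvExtract line "Email:")
  else if PySem.Str.isIn "Phone number:" line then
    info.insert "phone" (pvExtract line "Phone number:")
  else if PySem.Str.isIn "Location:" line then
    info.insert "location" (pvExtract line "Location:")
  else if PySem.Str.isIn "LinkedIn profile:" line then
    info.insert "linkedin" (pvExtract line "LinkedIn profile:")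
  else info

def parse_personal_info_py (section_ : String) : List (String × String) :=
  let info : PySem.Dict String String :=
    PySem.Dict.ofList [("name", ""), ("email", ""), ("phone", ""), ("location", ""), ("linkedin", "")]
  ((pvSplit section_ "\n").foldl pvStepA info).items

-- ===== PORT B =====
def pvFIELDS : List (String × String) :=
  [("Full name:", "name"), ("Email:", "email"), ("Phone number:", "phone"),
   ("Location:", "location"), ("LinkedIn profile:", "linkedin")]

-- _classify: first phrase of FIELDS contained in the line, else None
def pvClassify (fields : List (String × String)) (line : String) : Option String :=
  match fields with
  | [] => none
  | (phrase, _) :: rest =>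
    if PySem.Str.isIn phrase line then some phrase else pvClassify rest line

-- the inner 'for tag, line in tagged' loop: last matching line's extraction, else the default ""
def pvLastVal (phrase : String) (tagged : List (Option String × String)) : String :=
  tagged.foldl (fun v tl => if tl.1 == some phrase then pvExtract tl.2 phrase else v) ""

def parse_personal_info_py_alt (section_ : String) : List (String × String) :=
  let lines := (pvSplit section_ "\n").map (fun l => PySem.Str.stripChars l "- *")
  let tagged := lines.map (fun l => (pvClassify pvFIELDS l, l))
  (pvFIELDS.foldl
    (fun (info : PySem.Dict String String) pk => info.insert pk.2 (pvLastVal pk.1 tagged))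
    PySem.Dict.empty).items

-- ===== PRECONDITION & SPEC =====
def Spec_parse_personal_info_py (section_ : String) (out : List (String × String)) : Prop := out = parse_personal_info_py_alt section_
instance (section_ : String) (out : List (String × String)) : Decidable (Spec_parse_personal_info_py section_ out) := by unfold Spec_parse_personal_info_py; infer_instance

-- ===== CLAIM (what is proved, stated in full; the proofs are below) =====
def Claim_equal_parse_personal_info_py : Prop := ∀ (section_ : String), Dom_parse_personal_info_py section_ → Spec_parse_personal_info_py section_ (parse_personal_info_py section_)

-- ===== LEMMAS AND PROOFS =====

-- value of field `phrase` after folding B's inner loop over the raw lines, from default v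
def pvG (phrase v : String) (lines : List String) : String :=
  lines.foldl
    (fun v l =>
      let l' := PySem.Str.stripChars l "- *"
      if pvClassify pvFIELDS l' == some phrase then pvExtract l' phrase else v) v

lemma items_fold (lines : List String) : ∀ (vn ve vp vl vli : String),
    (lines.foldl pvStepA
      (PySem.Dict.ofList [("name", vn), ("email", ve), ("phone", vp), ("location", vl), ("linkedin", vli)])).items
    = [("name", pvG "Full name:" vn lines), ("email", pvG "Email:" ve lines),
       ("phone", pvG "Phone number:" vp lines), ("location", pvG "Location:" vl lines),
       ("linkedin", pvG "LinkedIn profile:" vli lines)] := by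
  induction lines with
  | nil => intro vn ve vp vl vli; rfl
  | cons l rest ih =>
    intro vn ve vp vl vli
    simp only [List.foldl_cons, pvStepA, pvG, pvClassify, pvFIELDS]
    by_cases h1 : PySem.Str.isIn "Full name:" (PySem.Str.stripChars l "- *") = true
    · simp only [h1, if_true]
      rw [show (PySem.Dict.ofList [("name", vn), ("email", ve), ("phone", vp), ("location", vl), ("linkedin", vli)]).insert "name" (pvExtract (PySem.Str.stripChars l "- *") "Full name:") = PySem.Dict.ofList [("name", (pvExtract (PySem.Str.stripChars l "- *") "Full name:")), ("email", ve), ("phone", vp), ("location", vl), ("linkedin", vli)] from rfl]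
      simpa [pvG, pvClassify, pvFIELDS, h1] using ih _ ve vp vl vli
    · rw [Bool.not_eq_true] at h1
      by_cases h2 : PySem.Str.isIn "Email:" (PySem.Str.stripChars l "- *") = true
      · simp only [h1, h2, Bool.false_eq_true, if_true, if_false]
        rw [show (PySem.Dict.ofList [("name", vn), ("email", ve), ("phone", vp), ("location", vl), ("linkedin", vli)]).insert "email" (pvExtract (PySem.Str.stripChars l "- *") "Email:") = PySem.Dict.ofList [("name", vn), ("email", (pvExtract (PySem.Str.stripChars l "- *") "Email:")), ("phone", vp), ("location", vl), ("linkedin", vli)] from rfl]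
        simpa [pvG, pvClassify, pvFIELDS, h1, h2] using ih vn _ vp vl vli
      · rw [Bool.not_eq_true] at h2
        by_cases h3 : PySem.Str.isIn "Phone number:" (PySem.Str.stripChars l "- *") = true
        · simp only [h1, h2, h3, Bool.false_eq_true, if_true, if_false]
          rw [show (PySem.Dict.ofList [("name", vn), ("email", ve), ("phone", vp), ("location", vl), ("linkedin", vli)]).insert "phone" (pvExtract (PySem.Str.stripChars l "- *") "Phone number:") = PySem.Dict.ofList [("name", vn), ("email", ve), ("phone", (pvExtract (PySem.Str.stripChars l "- *") "Phone number:")), ("location", vl), ("linkedin", vli)] from rfl]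
          simpa [pvG, pvClassify, pvFIELDS, h1, h2, h3] using ih vn ve _ vl vli
        · rw [Bool.not_eq_true] at h3
          by_cases h4 : PySem.Str.isIn "Location:" (PySem.Str.stripChars l "- *") = true
          · simp only [h1, h2, h3, h4, Bool.false_eq_true, if_true, if_false]
            rw [show (PySem.Dict.ofList [("name", vn), ("email", ve), ("phone", vp), ("location", vl), ("linkedin", vli)]).insert "location" (pvExtract (PySem.Str.stripChars l "- *") "Location:") = PySem.Dict.ofList [("name", vn), ("email", ve), ("phone", vp), ("location", (pvExtract (PySem.Str.stripChars l "- *") "Location:")), ("linkedin", vli)] from rfl]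
            simpa [pvG, pvClassify, pvFIELDS, h1, h2, h3, h4] using ih vn ve vp _ vli
          · rw [Bool.not_eq_true] at h4
            by_cases h5 : PySem.Str.isIn "LinkedIn profile:" (PySem.Str.stripChars l "- *") = true
            · simp only [h1, h2, h3, h4, h5, Bool.false_eq_true, if_true, if_false]
              rw [show (PySem.Dict.ofList [("name", vn), ("email", ve), ("phone", vp), ("location", vl), ("linkedin", vli)]).insert "linkedin" (pvExtract (PySem.Str.stripChars l "- *") "LinkedIn profile:") = PySem.Dict.ofList [("name", vn), ("email", ve), ("phone", vp), ("location", vl), ("linkedin", (pvExtract (PySem.Str.stripChars l "- *") "LinkedIn profile:"))] from rfl]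
              simpa [pvG, pvClassify, pvFIELDS, h1, h2, h3, h4, h5] using ih vn ve vp vl _
            · rw [Bool.not_eq_true] at h5
              simp only [h1, h2, h3, h4, h5, Bool.false_eq_true, if_false]
              simpa [pvG, pvClassify, pvFIELDS, h1, h2, h3, h4, h5] using ih vn ve vp vl vli

lemma lastVal_eq_G (phrase : String) (lines : List String) :
    pvLastVal phrase ((lines.map (fun l => PySem.Str.stripChars l "- *")).map
      (fun l => (pvClassify [("Full name:", "name"), ("Email:", "email"), ("Phone number:", "phone"),
        ("Location:", "location"), ("LinkedIn profile:", "linkedin")] l, l))) = pvG phrase "" lines := by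
  unfold pvLastVal pvG pvFIELDS
  rw [List.foldl_map, List.foldl_map]

-- ===== VERDICT (by name: the statement is the Claim_ definition above) =====
theorem parse_personal_info_py_spec : Claim_equal_parse_personal_info_py := by
  intro s _
  show parse_personal_info_py s = parse_personal_info_py_alt s
  unfold parse_personal_info_py parse_personal_info_py_alt
  rw [items_fold]
  simp only [pvFIELDS, List.foldl, lastVal_eq_G]
  rfl
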